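-- pv_equiv track=rewrite | github.com/Panfil-spb/HANGMAN-Python | main.py | showWord
-- ===== SOURCE A (Python) =====
-- def showWord(used, word):
--     wordGame = ""
--     for i in range(len(word)):
--         if word[i] in used:
--             wordGame += word[i]
--         else:
--             wordGame += "-"
--     return wordGame
-- ===== SOURCE B (Python) =====
-- def showWord(used, word):
--     table = {ord(c): "-" for c in word if c not in used}
--     return word.translate(table)
-- ===== Notes on version B (the rewrite author's own statement) =====
-- stated objective: faster
-- what changed: B builds a code-point-to-dash translation table for the unguessed letters once and applies str.translate in one C-level bulk pass, instead of A's per-index loop with a membership branch and repeated string concatenation.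
import Mathlib
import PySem

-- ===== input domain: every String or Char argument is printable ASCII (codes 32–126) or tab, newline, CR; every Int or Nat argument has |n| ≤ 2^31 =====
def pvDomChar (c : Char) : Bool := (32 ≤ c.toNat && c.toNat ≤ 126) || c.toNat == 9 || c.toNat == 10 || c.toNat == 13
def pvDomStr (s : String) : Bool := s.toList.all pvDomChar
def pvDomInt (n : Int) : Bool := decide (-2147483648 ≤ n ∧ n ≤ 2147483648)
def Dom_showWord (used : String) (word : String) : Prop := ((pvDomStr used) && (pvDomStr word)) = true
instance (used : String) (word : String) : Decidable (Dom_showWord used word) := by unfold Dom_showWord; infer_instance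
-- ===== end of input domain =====

-- B replaces A's index loop (per-character branch + string concatenation) by building a
-- translation table of unguessed characters once and applying it in a single bulk pass (idiomatic).


-- ===== PORT A =====
-- wordGame = ""; for i in range(len(word)): wordGame += word[i] if word[i] in used else "-"
def showWord (used : String) (word : String) : String :=
  let w := word.toList
  let wordGame : List Char :=
    (PySem.List.pyRange 0 (w.length : Int) 1).foldl
      (fun acc i =>
        let c := PySem.List.pyGetD w i ' '   -- word[i]; i always in range here
        if PySem.Chars.isIn [c] used.toList then acc ++ [c] else acc ++ ['-'])
      []
  String.ofList wordGame

-- ===== PORT B =====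
-- table = {ord(c): "-" for c in word if c not in used}; return word.translate(table)
def showWord_alt (used : String) (word : String) : String :=
  let table : PySem.Dict Char Char :=
    word.toList.foldl
      (fun d c => if PySem.Chars.isIn [c] used.toList then d else d.insert c '-')
      PySem.Dict.empty
  String.ofList (word.toList.map (fun c => table.getD c c))   -- translate: keep c unless mapped

-- ===== PRECONDITION & SPEC =====
def Spec_showWord (used : String) (word : String) (out : String) : Prop := out = showWord_alt used word
instance (used : String) (word : String) (out : String) : Decidable (Spec_showWord used word out) := by unfold Spec_showWord; infer_instance

-- ===== CLAIM (what is proved, stated in full; the proofs are below) =====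
def Claim_equal_showWord : Prop := ∀ (used : String) (word : String), Dom_showWord used word → Spec_showWord used word (showWord used word)

-- ===== LEMMAS AND PROOFS =====

-- B's table lookup after folding any list l over any starting dict d.
lemma table_getD (used : String) (l : List Char) (d : PySem.Dict Char Char) (c : Char) :
    (l.foldl (fun d c => if PySem.Chars.isIn [c] used.toList then d else d.insert c '-') d).getD c c
      = if c ∈ l ∧ PySem.Chars.isIn [c] used.toList = false then '-' else d.getD c c := by
  induction l generalizing d with
  | nil => simp
  | cons a l ih =>
    simp only [List.foldl_cons, ih]
    by_cases hmem : c ∈ l ∧ PySem.Chars.isIn [c] used.toList = false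
    · simp [hmem, List.mem_cons]
    · simp only [if_neg hmem]
      by_cases hca : c = a
      · subst hca
        by_cases hin : PySem.Chars.isIn [c] used.toList
        · simp [hin]
        · simp [hin, PySem.Dict.getD_insert_self]
      · have hnotall : ¬ (c ∈ a :: l ∧ PySem.Chars.isIn [c] used.toList = false) := by
          intro h
          rcases List.mem_cons.mp h.1 with h1 | h1
          · exact hca h1
          · exact hmem ⟨h1, h.2⟩
        by_cases hin : PySem.Chars.isIn [a] used.toList
        · rw [if_pos hin, if_neg hnotall]
        · rw [if_neg (by simp [hin]), PySem.Dict.getD_insert_of_ne _ _ _ hca, if_neg hnotall]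

-- ===== VERDICT (by name: the statement is the Claim_ definition above) =====
theorem showWord_spec : Claim_equal_showWord := by
  intro used word _
  unfold Spec_showWord showWord showWord_alt
  simp only
  congr 1
  refine Eq.trans (PySem.List.foldl_pyRange_zero_pyGetD' word.toList ' '
    (fun acc c => if PySem.Chars.isIn [c] used.toList then acc ++ [c] else acc ++ ['-']) []) ?_
  have hA : word.toList.foldl
      (fun acc c => if PySem.Chars.isIn [c] used.toList then acc ++ [c] else acc ++ ['-']) []
      = word.toList.map (fun c => if PySem.Chars.isIn [c] used.toList then c else '-') := by
    have hbody : (fun (acc : List Char) c =>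
          if PySem.Chars.isIn [c] used.toList then acc ++ [c] else acc ++ ['-'])
        = (fun acc c => acc ++ [if PySem.Chars.isIn [c] used.toList then c else '-']) := by
      funext acc c
      by_cases h : PySem.Chars.isIn [c] used.toList <;> simp [h]
    rw [hbody]
    have h0 := PySem.List.foldl_append_singleton_eq_map
      (fun c => if PySem.Chars.isIn [c] used.toList then c else '-') word.toList ([] : List Char)
    simpa using h0
  rw [hA]
  apply List.map_congr_left
  intro c hc
  rw [table_getD]
  by_cases h : PySem.Chars.isIn [c] used.toList
  · simp [h]
  · simp [hc, h]
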